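-- pv_equiv track=rewrite | github.com/Pedrochem/Advent-of-Code | day12/p1_combination.py | get_possible_springs
-- ===== SOURCE A (Python) =====
-- def get_possible_springs(springs,record):
--     possible_springs = [springs]
--     completed = []
--
--     for i,spr in enumerate(springs):
--         if spr == '?':
--             curr_size = len(possible_springs)
--             x=0
--             while (x<curr_size):
--                 pos1 = possible_springs[x][:i]+'#'+possible_springs[x][i+1:]
--                 pos2 = possible_springs[x][:i]+'.'+possible_springs[x][i+1:]
--                 possible_springs.append(pos1)
--                 possible_springs.append(pos2)
--
--                 if not '?' in pos1:
--                     completed.append(pos1)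
--                     completed.append(pos2)
--
--                 x+=1
--
--     return completed
-- ===== SOURCE B (Python) =====
-- def get_possible_springs(springs, record):
--     idx = [i for i, c in enumerate(springs) if c == '?']
--     if not idx:
--         return []
--     combos = [[]]
--     for _ in idx:
--         combos = [[c] + t for c in '#.' for t in combos]
--     res = []
--     for t in combos:
--         s = list(springs)
--         for i, c in zip(idx, t):
--             s[i] = c
--         res.append(''.join(s))
--     return res
-- ===== Notes on version B (the rewrite author's own statement) =====
-- stated objective: alternative
-- what changed: Instead of repeatedly growing a worklist of partially-expanded strings and collecting the fully-expanded ones, B collects the '?' indices once, enumerates the '#'/'.' combinations directly in product order, and writes each combination into a list copy of the string.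
import Mathlib
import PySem

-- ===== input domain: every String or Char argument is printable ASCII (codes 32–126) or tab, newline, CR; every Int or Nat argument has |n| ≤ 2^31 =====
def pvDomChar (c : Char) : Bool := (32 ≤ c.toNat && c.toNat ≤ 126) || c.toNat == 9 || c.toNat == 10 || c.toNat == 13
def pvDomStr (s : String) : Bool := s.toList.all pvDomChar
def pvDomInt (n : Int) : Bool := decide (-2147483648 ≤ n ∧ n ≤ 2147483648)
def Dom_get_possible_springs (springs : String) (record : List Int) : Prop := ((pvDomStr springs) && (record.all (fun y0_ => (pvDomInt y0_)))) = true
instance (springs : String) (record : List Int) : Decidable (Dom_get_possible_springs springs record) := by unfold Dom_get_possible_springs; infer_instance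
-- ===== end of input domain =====

-- B replaces A's worklist of partially-expanded strings with a direct enumeration
-- of the '#'/'.' combinations over the '?' positions (objective: alternative).


-- ===== PORT A =====
-- strings are modelled as List Char; springs[:i]+c+springs[i+1:] step for step via PySem slices
def repAt (e : List Char) (i : Int) (c : Char) : List Char :=
  PySem.List.slice e none (some i) ++ [c] ++ PySem.List.slice e (some (i + 1)) none

-- the 'while x < curr_size' loop; fuel = curr_size - x (the none branch of ps[x] is unreachable)
def loopA (i : Int) : Nat → Nat → List (List Char) × List (List Char) → List (List Char) × List (List Char)
  | 0, _, st => st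
  | fuel + 1, x, (ps, comp) =>
    match PySem.List.pyGet? ps (x : Int) with
    | none => (ps, comp)
    | some e =>
      let pos1 := repAt e i '#'
      let pos2 := repAt e i '.'
      let ps' := ps ++ [pos1] ++ [pos2]
      let comp' := if pos1.contains '?' = false then comp ++ [pos1] ++ [pos2] else comp
      loopA i fuel (x + 1) (ps', comp')

def get_possible_springs (springs : String) (record : List Int) : List String :=
  let l := springs.toList
  let st := (PySem.List.enumerate l 0).foldl
    (fun (st : List (List Char) × List (List Char)) p =>
      if p.2 = '?' then
        let curr_size := st.1.length
        loopA p.1 curr_size 0 st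
      else st)
    ([l], [])
  st.2.map String.mk

-- ===== PORT B =====
-- 'combos = [[c] + t for c in "#." for t in combos]' iterated len(idx) times
def combos : Nat → List (List Char)
  | 0 => [[]]
  | n + 1 => ['#', '.'].flatMap (fun c => (combos n).map (c :: ·))

def get_possible_springs_alt (springs : String) (record : List Int) : List String :=
  let l := springs.toList
  let idx := (PySem.List.enumerate l 0).filterMap (fun p => if p.2 = '?' then some p.1 else none)
  if idx = [] then []
  else (combos idx.length).map (fun t =>
    String.mk ((idx.zip t).foldl (fun s p => PySem.List.pySetD s p.1 p.2) l))

-- ===== PRECONDITION & SPEC =====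
def Spec_get_possible_springs (springs : String) (record : List Int) (out : List String) : Prop := out = get_possible_springs_alt springs record
instance (springs : String) (record : List Int) (out : List String) : Decidable (Spec_get_possible_springs springs record out) := by unfold Spec_get_possible_springs; infer_instance

-- ===== CLAIM (what is proved, stated in full; the proofs are below) =====
def Claim_equal_get_possible_springs : Prop := ∀ (springs : String) (record : List Int), Dom_get_possible_springs springs record → Spec_get_possible_springs springs record (get_possible_springs springs record)

-- ===== LEMMAS AND PROOFS =====

-- positions of '?' in cs, scanning from absolute position n
def qpos : List Char → Nat → List Nat
  | [], _ => []
  | c :: cs, n => if c = '?' then n :: qpos cs (n + 1) else qpos cs (n + 1)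

-- expansion of l over the '?' positions qs, head position slowest-varying
def E : List Char → List Nat → List (List Char)
  | l, [] => [l]
  | l, q :: qs => E (l.set q '#') qs ++ E (l.set q '.') qs

-- "every '?' of e (scanning from absolute position n) lies in qs"
def Pb (qs : List Nat) : Nat → List Char → Bool
  | _, [] => true
  | n, c :: e => (!(c = '?') || qs.contains n) && Pb qs (n + 1) e

def fA (q : Nat) (e : List Char) : List (List Char) := [repAt e (q : Int) '#', repAt e (q : Int) '.']
def gA (q : Nat) (e : List Char) : List (List Char) :=
  if (repAt e (q : Int) '#').contains '?' = false then [repAt e (q : Int) '#', repAt e (q : Int) '.'] else []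
def hA (q : Nat) (st : List (List Char) × List (List Char)) : List (List Char) × List (List Char) :=
  (st.1 ++ st.1.flatMap (fA q), st.2 ++ st.1.flatMap (gA q))

lemma repAt_natCast (e : List Char) (q : Nat) (c : Char) :
    repAt e (q : Int) c = e.take q ++ [c] ++ e.drop (q + 1) := by
  have h1 : ((q : Int) + 1) = ((q + 1 : Nat) : Int) := by push_cast; ring
  rw [repAt, h1, PySem.List.slice_to_natCast, PySem.List.slice_from_natCast]

lemma repAt_eq_set (e : List Char) (q : Nat) (c : Char) (h : q < e.length) :
    repAt e (q : Int) c = e.set q c := by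
  rw [repAt_natCast, List.set_eq_take_cons_drop _ h]
  simp

lemma loopA_go (i : Nat) : ∀ (rest done comp : List (List Char)),
    loopA (i : Int) rest.length done.length (done ++ rest ++ done.flatMap (fA i), comp) =
      ((done ++ rest) ++ (done ++ rest).flatMap (fA i), comp ++ rest.flatMap (gA i)) := by
  intro rest
  induction rest with
  | nil => intro done comp; simp [loopA]
  | cons e rest' ih =>
    intro done comp
    have hget : PySem.List.pyGet? (done ++ (e :: rest') ++ done.flatMap (fA i))
        ((done.length : Nat) : Int) = some e := by
      have := PySem.List.pyGet?_append_length done (rest' ++ done.flatMap (fA i)) e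
      simpa using this
    simp only [List.length_cons, loopA, hget]
    have h2 : (done ++ (e :: rest') ++ done.flatMap (fA i)) ++ [repAt e (i : Int) '#'] ++ [repAt e (i : Int) '.']
        = (done ++ [e]) ++ rest' ++ (done ++ [e]).flatMap (fA i) := by
      simp [fA]
    have h3 : done.length + 1 = (done ++ [e]).length := by simp
    by_cases hc : (repAt e (i : Int) '#').contains '?' = false
    · simp only [hc, if_true, eq_self_iff_true, h2, h3, if_pos]
      rw [ih (done ++ [e]) (comp ++ [repAt e (i : Int) '#'] ++ [repAt e (i : Int) '.'])]
      simp only [gA, List.flatMap_cons, List.append_assoc]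
      rw [if_pos hc]
      simp
    · have hc' : (repAt e (i : Int) '#').contains '?' = true := by
        cases h : (repAt e (i : Int) '#').contains '?' with
        | false => exact absurd h hc
        | true => rfl
      simp only [hc', h2, h3, if_neg (by simp : ¬ (true = false))]
      rw [ih (done ++ [e]) comp]
      have hm : '?' ∈ repAt e (i : Int) '#' := by simpa using hc'
      have hg : gA i e = [] := by
        simp only [gA]
        rw [if_neg (by simp [hm])]
      simp [hg]
      

lemma loopA_spec (i : Nat) (ps comp : List (List Char)) :
    loopA (i : Int) ps.length 0 (ps, comp) = hA i (ps, comp) := by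
  have := loopA_go i ps [] comp
  simpa [hA] using this

lemma fold_enum (cs : List Char) : ∀ (n : Nat) (st : List (List Char) × List (List Char)),
    (PySem.List.enumerate cs (n : Int)).foldl
      (fun (st : List (List Char) × List (List Char)) p =>
        if p.2 = '?' then loopA p.1 st.1.length 0 st else st) st
      = (qpos cs n).foldl (fun st q => hA q st) st := by
  induction cs with
  | nil => intro n st; simp [PySem.List.enumerate_nil, qpos]
  | cons c cs ih =>
    intro n st
    have h1 : ((n : Int) + 1) = ((n + 1 : Nat) : Int) := by push_cast; ring
    rw [PySem.List.enumerate_cons, h1]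
    by_cases hc : c = '?'
    · cases st with
      | mk ps comp =>
        simp only [List.foldl_cons, qpos, if_pos hc, hc, if_true]
        rw [ih (n + 1)]
        simp [loopA_spec n ps comp]
    · simp only [List.foldl_cons, qpos, if_neg hc, hc]
      rw [ih (n + 1)]
      simp [hc]

lemma qpos_mem : ∀ (cs : List Char) (n j : Nat), j ∈ qpos cs n ↔ n ≤ j ∧ cs[j - n]? = some '?' := by
  intro cs
  induction cs with
  | nil => intro n j; simp [qpos]
  | cons c cs ih =>
    intro n j
    by_cases hc : c = '?'
    · simp only [qpos, if_pos hc, List.mem_cons, ih (n + 1) j]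
      constructor
      · rintro (rfl | ⟨h1, h2⟩)
        · simp [hc]
        · refine ⟨by omega, ?_⟩
          have hd : j - n = (j - (n + 1)) + 1 := by omega
          rw [hd]
          simpa using h2
      · rintro ⟨h1, h2⟩
        rcases Nat.eq_or_lt_of_le h1 with rfl | hlt
        · left; rfl
        · right
          refine ⟨by omega, ?_⟩
          have hd : j - n = (j - (n + 1)) + 1 := by omega
          rw [hd] at h2
          simpa using h2
    · simp only [qpos, if_neg hc, ih (n + 1) j]
      constructor
      · rintro ⟨h1, h2⟩
        refine ⟨by omega, ?_⟩
        have hd : j - n = (j - (n + 1)) + 1 := by omega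
        rw [hd]
        simpa using h2
      · rintro ⟨h1, h2⟩
        have hne : n ≠ j := by
          rintro rfl
          simp at h2
          exact hc h2
        refine ⟨by omega, ?_⟩
        have hd : j - n = (j - (n + 1)) + 1 := by omega
        rw [hd] at h2
        simpa using h2

lemma qpos_ge : ∀ (cs : List Char) (n j : Nat), j ∈ qpos cs n → n ≤ j := by
  intro cs n j h
  exact ((qpos_mem cs n j).1 h).1

lemma qpos_pairwise : ∀ (cs : List Char) (n : Nat), (qpos cs n).Pairwise (· < ·) := by
  intro cs
  induction cs with
  | nil => intro n; simp [qpos]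
  | cons c cs ih =>
    intro n
    by_cases hc : c = '?'
    · simp only [qpos, if_pos hc]
      refine List.Pairwise.cons ?_ (ih (n + 1))
      intro j hj
      have := qpos_ge cs (n + 1) j hj
      omega
    · simp only [qpos, if_neg hc]
      exact ih (n + 1)

lemma Pb_iff (qs : List Nat) : ∀ (e : List Char) (n : Nat),
    Pb qs n e = true ↔ ∀ j, e[j]? = some '?' → (n + j) ∈ qs := by
  intro e
  induction e with
  | nil => intro n; simp [Pb]
  | cons c e ih =>
    intro n
    simp only [Pb, Bool.and_eq_true, Bool.or_eq_true, ih (n + 1)]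
    constructor
    · rintro ⟨h1, h2⟩ j hj
      cases j with
      | zero =>
        simp at hj
        subst hj
        rcases h1 with h1 | h1
        · simp at h1
        · simpa using h1
      | succ j =>
        have := h2 j (by simpa using hj)
        have harith : n + (j + 1) = n + 1 + j := by omega
        rw [harith]
        exact this
    · intro h
      constructor
      · by_cases hc : c = '?'
        · right
          have := h 0 (by simp [hc])
          simpa using this
        · left; simpa using hc
      · intro j hj
        have := h (j + 1) (by simpa using hj)
        have harith : n + (j + 1) = n + 1 + j := by omega
        rw [harith] at this
        exact this

lemma filter_flatMap_pair {p : List Char → Bool} :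
    ∀ (l : List (List Char)) (f : List Char → List (List Char)),
      (l.filter p).flatMap f = l.flatMap (fun e => if p e then f e else []) := by
  intro l f
  induction l with
  | nil => simp
  | cons e l ih =>
    by_cases hp : p e
    · simp [List.filter_cons, hp, ih]
    · simp [List.filter_cons, hp, ih]

lemma filter_flatMap_comm {α β : Type} (l : List α) (f : α → List β) (p : β → Bool) :
    (l.flatMap f).filter p = l.flatMap (fun e => (f e).filter p) := by
  induction l with
  | nil => simp
  | cons e l ih => simp only [List.flatMap_cons, List.filter_append, ih]

lemma flatMap_flatMap' {α β γ : Type} (l : List α) (f : α → List β) (g : β → List γ) :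
    (l.flatMap f).flatMap g = l.flatMap (fun x => (f x).flatMap g) := by
  induction l with
  | nil => simp
  | cons e l ih => simp only [List.flatMap_cons, List.flatMap_append, ih]

lemma flatMap_congr_mem {α β : Type} {l : List α} {f g : α → List β}
    (h : ∀ e ∈ l, f e = g e) : l.flatMap f = l.flatMap g := by
  induction l with
  | nil => simp
  | cons e l ih =>
    simp only [List.flatMap_cons]
    rw [h e (by simp), ih (fun x hx => h x (by simp [hx]))]

lemma getElem?_set_eq_ite (l : List Char) (q j : Nat) (c : Char) (hq : q < l.length) :
    (l.set q c)[j]? = if q = j then some c else l[j]? := by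
  by_cases h : q = j
  · subst h; rw [if_pos rfl]; exact List.getElem?_set_self hq
  · rw [if_neg h]; exact List.getElem?_set_ne h

-- '?' survives in e.set q c exactly away from q (c itself is not '?')
lemma contains_set_false_iff (e : List Char) (q : Nat) (c : Char)
    (hq : e[q]? = some '?') (hc : ¬ c = '?') :
    ((e.set q c).contains '?' = false) ↔ (∀ j, e[j]? = some '?' → j = q) := by
  have hlt : q < e.length := by
    have := List.getElem?_eq_some_iff.1 hq
    exact this.1
  constructor
  · intro h j hj
    by_contra hne
    have hmem : '?' ∈ e.set q c := by
      rw [List.mem_iff_getElem?]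
      exact ⟨j, by rw [getElem?_set_eq_ite e q j c hlt, if_neg (fun hh => hne hh.symm)]; exact hj⟩
    simp [hmem] at h
  · intro h
    by_contra hcon
    have hmem : '?' ∈ e.set q c := by
      cases hb : (e.set q c).contains '?' with
      | false => exact absurd hb hcon
      | true => simpa using hb
    rw [List.mem_iff_getElem?] at hmem
    obtain ⟨j, hj⟩ := hmem
    rw [getElem?_set_eq_ite e q j c hlt] at hj
    by_cases hqj : q = j
    · rw [if_pos hqj] at hj
      exact hc (by injection hj)
    · rw [if_neg hqj] at hj
      exact hqj (h j hj).symm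

lemma Pb_set_step (e : List Char) (q : Nat) (qs' : List Nat) (c : Char)
    (hq : e[q]? = some '?') (hc : ¬ c = '?') (hnin : q ∉ qs') :
    Pb qs' 0 (e.set q c) = Pb (q :: qs') 0 e := by
  have hlt : q < e.length := (List.getElem?_eq_some_iff.1 hq).1
  rw [Bool.eq_iff_iff, Pb_iff, Pb_iff]
  constructor
  · intro h j hj
    by_cases hqj : q = j
    · simp [← hqj]
    · have := h j (by rw [getElem?_set_eq_ite e q j c hlt, if_neg hqj]; exact hj)
      simp at this ⊢
      right; exact this
  · intro h j hj
    rw [getElem?_set_eq_ite e q j c hlt] at hj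
    by_cases hqj : q = j
    · rw [if_pos hqj] at hj
      exact absurd (by injection hj) hc
    · rw [if_neg hqj] at hj
      have := h j hj
      simp at this ⊢
      rcases this with h1 | h1
      · exact absurd h1.symm hqj
      · exact h1

lemma Pb_false_of_missing (e : List Char) (q : Nat) (qs' : List Nat)
    (hq : e[q]? = some '?') (hnin : q ∉ qs') : Pb qs' 0 e = false := by
  cases hb : Pb qs' 0 e with
  | false => rfl
  | true =>
    have := (Pb_iff qs' e 0).1 hb q hq
    simp at this
    exact absurd this hnin

lemma main_inv : ∀ (qs : List Nat) (ps comp : List (List Char)),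
    qs.Pairwise (· < ·) →
    (∀ e ∈ ps, ∀ j ∈ qs, e[j]? = some '?') →
    ((qs.foldl (fun st q => hA q st) (ps, comp)).2
      = comp ++ (if qs = [] then [] else (ps.filter (Pb qs 0)).flatMap (fun e => E e qs))) := by
  intro qs
  induction qs with
  | nil => intro ps comp _ _; simp
  | cons q qs' ih =>
    intro ps comp hpw hmem
    have hq_e : ∀ e ∈ ps, e[q]? = some '?' := fun e he => hmem e he q (by simp)
    have hqlt : ∀ q' ∈ qs', q < q' := fun q' h => (List.pairwise_cons.1 hpw).1 q' h
    have hnin : q ∉ qs' := fun h => lt_irrefl q (hqlt q h)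
    simp only [List.foldl_cons]
    have hA_def : hA q (ps, comp) = (ps ++ ps.flatMap (fA q), comp ++ ps.flatMap (gA q)) := rfl
    rw [hA_def]
    cases hqs' : qs' with
    | nil =>
      subst hqs'
      simp only [List.foldl_nil]
      rw [if_neg (by simp : ¬ (q :: ([] : List Nat)) = [])]
      rw [filter_flatMap_pair]
      apply congrArg (comp ++ ·)
      apply flatMap_congr_mem
      intro e he
      have hq' := hq_e e he
      have hlt : q < e.length := (List.getElem?_eq_some_iff.1 hq').1
      have hrep1 : repAt e (q : Int) '#' = e.set q '#' := repAt_eq_set e q '#' hlt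
      have hrep2 : repAt e (q : Int) '.' = e.set q '.' := repAt_eq_set e q '.' hlt
      have hiff : ((e.set q '#').contains '?' = false) ↔ (Pb [q] 0 e = true) := by
        rw [contains_set_false_iff e q '#' hq' (by decide), Pb_iff]
        constructor
        · intro h j hj; simp [h j hj]
        · intro h j hj
          have := h j hj
          simpa using this
      simp only [gA, hrep1, hrep2]
      by_cases hb : Pb [q] 0 e = true
      · rw [if_pos (hiff.2 hb), if_pos hb]
        simp [E]
      · rw [if_neg (fun hh => hb (hiff.1 hh)), if_neg (by simp [hb])]
    | cons q0 qs0 =>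
      rw [← hqs']
      have hne : qs' ≠ [] := by rw [hqs']; simp
      have hgnil : ps.flatMap (gA q) = [] := by
        have : ∀ e ∈ ps, gA q e = [] := by
          intro e he
          have hq' := hq_e e he
          have hlt : q < e.length := (List.getElem?_eq_some_iff.1 hq').1
          have hq0 : e[q0]? = some '?' := hmem e he q0 (by simp [hqs'])
          have hmem' : '?' ∈ repAt e (q : Int) '#' := by
            rw [repAt_eq_set e q '#' hlt, List.mem_iff_getElem?]
            refine ⟨q0, ?_⟩
            rw [getElem?_set_eq_ite e q q0 '#' hlt, if_neg ?_]
            · exact hq0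
            · intro hh
              have := hqlt q0 (by simp [hqs'])
              omega
          simp only [gA]
          rw [if_neg (by simp [hmem'])]
        rw [flatMap_congr_mem this]
        simp
      rw [hgnil, List.append_nil]
      rw [ih (ps ++ ps.flatMap (fA q)) comp (List.pairwise_cons.1 hpw).2 ?hmem']
      case hmem' =>
        intro e he j hj
        rcases List.mem_append.1 he with he' | he'
        · exact hmem e he' j (by simp [hj])
        · rw [List.mem_flatMap] at he'
          obtain ⟨e0, he0, hin⟩ := he'
          have hq' := hq_e e0 he0
          have hlt : q < e0.length := (List.getElem?_eq_some_iff.1 hq').1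
          have hjq : ¬ q = j := by
            intro hh
            subst hh
            exact hnin hj
          have he0j : e0[j]? = some '?' := hmem e0 he0 j (by simp [hj])
          simp only [fA, repAt_eq_set e0 q '#' hlt, repAt_eq_set e0 q '.' hlt] at hin
          rcases (by simpa using hin : e = e0.set q '#' ∨ e = e0.set q '.') with rfl | rfl
          · rw [getElem?_set_eq_ite e0 q j '#' hlt, if_neg hjq]; exact he0j
          · rw [getElem?_set_eq_ite e0 q j '.' hlt, if_neg hjq]; exact he0j
      rw [if_neg hne, if_neg (by simp : ¬ (q :: qs') = [])]
      apply congrArg (comp ++ ·)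
      -- rewrite the filtered list
      have hfilter : (ps ++ ps.flatMap (fA q)).filter (Pb qs' 0)
          = (ps.filter (Pb (q :: qs') 0)).flatMap (fun e => [e.set q '#', e.set q '.']) := by
        rw [List.filter_append]
        have h1 : ps.filter (Pb qs' 0) = [] := by
          apply List.filter_eq_nil_iff.2
          intro e he
          rw [Pb_false_of_missing e q qs' (hq_e e he) hnin]
          simp
        rw [h1, List.nil_append]
        rw [filter_flatMap_comm, filter_flatMap_pair]
        apply flatMap_congr_mem
        intro e he
        have hq' := hq_e e he
        have hlt : q < e.length := (List.getElem?_eq_some_iff.1 hq').1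
        simp only [fA, repAt_eq_set e q '#' hlt, repAt_eq_set e q '.' hlt]
        have hP1 : Pb qs' 0 (e.set q '#') = Pb (q :: qs') 0 e :=
          Pb_set_step e q qs' '#' hq' (by decide) hnin
        have hP2 : Pb qs' 0 (e.set q '.') = Pb (q :: qs') 0 e :=
          Pb_set_step e q qs' '.' hq' (by decide) hnin
        by_cases hb : Pb (q :: qs') 0 e = true
        · rw [if_pos hb]
          simp [List.filter_cons, hP1, hP2, hb]
        · rw [if_neg hb]
          have hb1 : Pb (q :: qs') 0 e = false := by
            cases hx : Pb (q :: qs') 0 e with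
            | false => rfl
            | true => exact absurd hx hb
          simp [List.filter_cons, hP1, hP2, hb1]
      rw [hfilter, flatMap_flatMap']
      apply flatMap_congr_mem
      intro e _
      simp [E]

lemma E_eq : ∀ (qs : List Nat) (l : List Char),
    E l qs = (combos qs.length).map (fun t => (qs.zip t).foldl (fun s p => s.set p.1 p.2) l) := by
  intro qs
  induction qs with
  | nil => intro l; simp [E, combos]
  | cons q qs ih =>
    intro l
    simp only [E, List.length_cons, combos, List.flatMap_cons, List.flatMap_nil,
      List.map_append, List.append_nil, List.map_map]
    rw [ih (l.set q '#'), ih (l.set q '.')]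
    congr 1 <;> · apply List.map_congr_left; intro t _; simp [List.zip_cons_cons]

lemma idx_eq (cs : List Char) : ∀ (n : Nat),
    (PySem.List.enumerate cs (n : Int)).filterMap (fun p => if p.2 = '?' then some p.1 else none)
      = (qpos cs n).map (Nat.cast) := by
  induction cs with
  | nil => intro n; simp [PySem.List.enumerate_nil, qpos]
  | cons c cs ih =>
    intro n
    have h1 : ((n : Int) + 1) = ((n + 1 : Nat) : Int) := by push_cast; ring
    rw [PySem.List.enumerate_cons, h1, List.filterMap_cons, ih (n + 1)]
    by_cases hc : c = '?'
    · simp [qpos, hc]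
    · simp [qpos, hc]

lemma zip_cast_foldl : ∀ (qs : List Nat) (t : List Char) (l : List Char),
    ((qs.map (Nat.cast : Nat → Int)).zip t).foldl (fun s p => PySem.List.pySetD s p.1 p.2) l
      = (qs.zip t).foldl (fun s p => s.set p.1 p.2) l := by
  intro qs
  induction qs with
  | nil => intro t l; simp
  | cons q qs ih =>
    intro t l
    cases t with
    | nil => simp
    | cons c t =>
      simp only [List.map_cons, List.zip_cons_cons, List.foldl_cons, PySem.List.pySetD_natCast]
      exact ih t (l.set q c)

lemma port_A_eq (springs : String) (record : List Int) :
    get_possible_springs springs record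
      = (if qpos springs.toList 0 = [] then []
         else E springs.toList (qpos springs.toList 0)).map String.mk := by
  unfold get_possible_springs
  dsimp only
  have h0 : (0 : Int) = ((0 : Nat) : Int) := by norm_num
  rw [h0, fold_enum springs.toList 0 ([springs.toList], [])]
  rw [main_inv (qpos springs.toList 0) [springs.toList] [] (qpos_pairwise springs.toList 0) ?hm]
  case hm =>
    intro e he j hj
    rcases (by simpa using he : e = springs.toList) with rfl
    have := ((qpos_mem springs.toList 0 j).1 hj).2
    simpa using this
  have hPb : Pb (qpos springs.toList 0) 0 springs.toList = true := by
    rw [Pb_iff]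
    intro j hj
    rw [qpos_mem]
    constructor
    · omega
    · simpa using hj
  cases hq : qpos springs.toList 0 with
  | nil => simp [hq]
  | cons q0 qs0 =>
    rw [← hq]
    rw [if_neg (by rw [hq]; simp), if_neg (by rw [hq]; simp)]
    simp [List.filter_cons, hPb]

theorem get_possible_springs_spec_aux (springs : String) (record : List Int) :
    get_possible_springs springs record = get_possible_springs_alt springs record := by
  rw [port_A_eq springs record]
  unfold get_possible_springs_alt
  dsimp only
  have h0 : (0 : Int) = ((0 : Nat) : Int) := by norm_num
  rw [h0, idx_eq springs.toList 0]
  cases hq : qpos springs.toList 0 with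
  | nil => simp [hq]
  | cons q0 qs0 =>
    rw [← hq]
    rw [if_neg (by rw [hq]; simp), if_neg (by rw [hq]; simp)]
    rw [E_eq (qpos springs.toList 0) springs.toList, List.map_map, List.length_map]
    apply List.map_congr_left
    intro t _
    simp only [Function.comp_apply]
    rw [zip_cast_foldl]

-- ===== VERDICT (by name: the statement is the Claim_ definition above) =====
theorem get_possible_springs_spec : Claim_equal_get_possible_springs := by
  intro springs record _
  exact get_possible_springs_spec_aux springs record
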